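-- pv_equiv track=rewrite | github.com/leticialopesms/MC102 | labs/lab09/lab09.py | espelhamento
-- ===== SOURCE A (Python) =====
-- def criar_matriz(altura, largura, termo = ' '):
--     '''Cria uma matriz auxiliar para as operações.'''
--     matriz = []
--     for i in range(altura):
--         matriz.append([])
--         for _ in range(largura):
--             matriz[i].append(termo)
--     return matriz
--
-- def espelhamento(matriz, matriz_selecionada, y_selecao, x_selecao, orientacao_de_espelhamento):
--     '''Espelha a área selecionada.'''
--     altura = len(matriz_selecionada)
--     largura = len(matriz_selecionada[0])
--
--     if orientacao_de_espelhamento == 'h':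
--         matriz_espelhada = []
--         for linha in matriz_selecionada:
--             linha_espelhada = linha[::-1]
--             matriz_espelhada.append(linha_espelhada)
--
--     if orientacao_de_espelhamento == 'v':
--         matriz_espelhada = criar_matriz(altura, largura)
--         for i in range(altura):
--             linha = matriz_selecionada[(altura - 1) - i]
--             for j in range(largura):
--                 elemento = linha[j]
--                 matriz_espelhada[i][j] = elemento
--
--     for i in range(altura):
--         for j in range(largura):
--             matriz[i + y_selecao][j + x_selecao] = matriz_espelhada[i][j]
--     return matriz
-- ===== SOURCE B (Python) =====
-- def espelhamento(matriz, matriz_selecionada, y_selecao, x_selecao, orientacao_de_espelhamento):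
--     '''Espelha a area selecionada, escrevendo direto na matriz alvo em uma unica passada.'''
--     altura = len(matriz_selecionada)
--     largura = len(matriz_selecionada[0])
--     for i, linha in enumerate(matriz_selecionada):
--         if orientacao_de_espelhamento == 'h':
--             fonte = linha[::-1]
--         else:  # 'v'
--             fonte = matriz_selecionada[altura - 1 - i]
--         for j in range(largura):
--             matriz[i + y_selecao][j + x_selecao] = fonte[j]
--     return matriz
-- ===== Notes on version B (the rewrite author's own statement) =====
-- stated objective: simpler
-- what changed: Drops the criar_matriz helper and the intermediate mirrored matrix: one pass over enumerate(matriz_selecionada) picks each source row (reversed row for 'h', opposite row for 'v') and writes it directly into the target.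
import Mathlib
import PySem

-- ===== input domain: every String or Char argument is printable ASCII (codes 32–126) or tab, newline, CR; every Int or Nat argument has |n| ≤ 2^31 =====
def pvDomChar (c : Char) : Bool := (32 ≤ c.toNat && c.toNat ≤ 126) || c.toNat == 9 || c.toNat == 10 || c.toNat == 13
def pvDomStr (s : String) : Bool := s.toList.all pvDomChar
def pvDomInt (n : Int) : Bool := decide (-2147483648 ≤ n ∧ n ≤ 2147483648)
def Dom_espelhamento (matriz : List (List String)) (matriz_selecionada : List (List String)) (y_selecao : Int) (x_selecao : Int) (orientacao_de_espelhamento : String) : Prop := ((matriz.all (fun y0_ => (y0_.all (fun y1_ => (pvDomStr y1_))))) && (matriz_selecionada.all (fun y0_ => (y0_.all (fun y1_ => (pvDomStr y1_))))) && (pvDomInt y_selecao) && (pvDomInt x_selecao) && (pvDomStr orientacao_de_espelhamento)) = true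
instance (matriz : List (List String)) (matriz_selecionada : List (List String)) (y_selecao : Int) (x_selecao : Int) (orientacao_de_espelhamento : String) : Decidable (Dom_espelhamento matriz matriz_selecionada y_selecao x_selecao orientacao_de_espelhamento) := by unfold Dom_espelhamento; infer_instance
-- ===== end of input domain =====

-- B drops the intermediate mirrored matrix and the criar_matriz helper: one pass writes each mirrored
-- element directly into the target (objective: simpler). Both A and B mutate `matriz` in place in Python
-- (the same mutation); the equivalence proved here is about the returned value, assuming
-- matriz_selecionada does not alias the mutated rows of matriz (Lean lists cannot alias).

-- ===== PORT A =====
-- shared primitive: the Python statement  m[k][l] = v  (total form; in-range under Pre_)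
def pySet2d (m : List (List String)) (k l : Int) (v : String) : List (List String) :=
  PySem.List.pySetD m k (PySem.List.pySetD (PySem.List.pyGetD m k []) l v)

-- helper criar_matriz(altura, largura, termo): append an empty row then append `termo` largura times
def criar_matriz (altura largura : Int) (termo : String) : List (List String) :=
  (PySem.List.pyRange 0 altura 1).foldl
    (fun acc _ =>
      acc ++ [(PySem.List.pyRange 0 largura 1).foldl (fun row _ => row ++ [termo]) []]) []

def espelhamento (matriz : List (List String)) (matriz_selecionada : List (List String)) (y_selecao : Int) (x_selecao : Int) (orientacao_de_espelhamento : String) : List (List String) :=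
  let altura : Int := matriz_selecionada.length
  let largura : Int := (PySem.List.pyGetD matriz_selecionada 0 []).length
  let matriz_espelhada : List (List String) :=
    if orientacao_de_espelhamento == "h" then
      matriz_selecionada.foldl
        (fun acc linha => acc ++ [(PySem.List.slice? linha none none (-1)).getD []]) []
    else if orientacao_de_espelhamento == "v" then
      (PySem.List.pyRange 0 altura 1).foldl
        (fun me i =>
          let linha := PySem.List.pyGetD matriz_selecionada ((altura - 1) - i) []
          (PySem.List.pyRange 0 largura 1).foldl
            (fun me j => pySet2d me i j (PySem.List.pyGetD linha j " ")) me) (criar_matriz altura largura " ")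
    else []  -- Python: UnboundLocalError here; excluded by Pre_
  (PySem.List.pyRange 0 altura 1).foldl
    (fun m i =>
      (PySem.List.pyRange 0 largura 1).foldl
        (fun m j =>
          pySet2d m (i + y_selecao) (j + x_selecao)
            (PySem.List.pyGetD (PySem.List.pyGetD matriz_espelhada i []) j " ")) m) matriz

-- ===== PORT B =====
def espelhamento_alt (matriz : List (List String)) (matriz_selecionada : List (List String)) (y_selecao : Int) (x_selecao : Int) (orientacao_de_espelhamento : String) : List (List String) :=
  let altura : Int := matriz_selecionada.length
  let largura : Int := (PySem.List.pyGetD matriz_selecionada 0 []).length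
  (PySem.List.enumerate matriz_selecionada 0).foldl
    (fun m p =>
      let fonte : List String :=
        if orientacao_de_espelhamento == "h" then p.2.reverse
        else PySem.List.pyGetD matriz_selecionada (altura - 1 - p.1) []
      (PySem.List.pyRange 0 largura 1).foldl
        (fun m j =>
          pySet2d m (p.1 + y_selecao) (j + x_selecao) (PySem.List.pyGetD fonte j " ")) m) matriz

-- ===== PRECONDITION & SPEC =====
-- Pre_ holds exactly where the Python A returns: the selection is nonempty, and either its first row is
-- empty (largura = 0: every loop body is skipped and A returns matriz untouched, whatever the orientation),
-- or the orientation is 'h' or 'v' (else UnboundLocalError), every selected row is long enough to be read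
-- (else IndexError), and every target cell written lies inside matriz under Python indexing (else IndexError).
def Pre_espelhamento (matriz : List (List String)) (matriz_selecionada : List (List String)) (y_selecao : Int) (x_selecao : Int) (orientacao_de_espelhamento : String) : Prop :=
  matriz_selecionada ≠ [] ∧
  ((PySem.List.pyGetD matriz_selecionada 0 []).length = 0 ∨
   ((orientacao_de_espelhamento = "h" ∨ orientacao_de_espelhamento = "v") ∧
    (∀ linha ∈ matriz_selecionada, (PySem.List.pyGetD matriz_selecionada 0 []).length ≤ linha.length) ∧
    (∀ i : Nat, i < matriz_selecionada.length →
      PySem.Raise.InRange matriz.length ((i : Int) + y_selecao) ∧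
      ∀ j : Nat, j < (PySem.List.pyGetD matriz_selecionada 0 []).length →
        PySem.Raise.InRange (PySem.List.pyGetD matriz ((i : Int) + y_selecao) []).length ((j : Int) + x_selecao))))
instance (matriz : List (List String)) (matriz_selecionada : List (List String)) (y_selecao : Int) (x_selecao : Int) (orientacao_de_espelhamento : String) : Decidable (Pre_espelhamento matriz matriz_selecionada y_selecao x_selecao orientacao_de_espelhamento) := by unfold Pre_espelhamento; infer_instance

def pvWitness_espelhamento : List (List String) × List (List String) × Int × Int × String :=
  ([["a", "b", "c"], ["d", "e", "f"], ["g", "h", "i"]], [["1", "2"], ["3", "4"]], 1, 0, "h")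

def Spec_espelhamento (matriz : List (List String)) (matriz_selecionada : List (List String)) (y_selecao : Int) (x_selecao : Int) (orientacao_de_espelhamento : String) (out : List (List String)) : Prop := out = espelhamento_alt matriz matriz_selecionada y_selecao x_selecao orientacao_de_espelhamento
instance (matriz : List (List String)) (matriz_selecionada : List (List String)) (y_selecao : Int) (x_selecao : Int) (orientacao_de_espelhamento : String) (out : List (List String)) : Decidable (Spec_espelhamento matriz matriz_selecionada y_selecao x_selecao orientacao_de_espelhamento out) := by unfold Spec_espelhamento; infer_instance

-- ===== CLAIM (what is proved, stated in full; the proofs are below) =====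
def Claim_equal_espelhamento : Prop := ∀ (matriz : List (List String)) (matriz_selecionada : List (List String)) (y_selecao : Int) (x_selecao : Int) (orientacao_de_espelhamento : String), Dom_espelhamento matriz matriz_selecionada y_selecao x_selecao orientacao_de_espelhamento → Pre_espelhamento matriz matriz_selecionada y_selecao x_selecao orientacao_de_espelhamento → Spec_espelhamento matriz matriz_selecionada y_selecao x_selecao orientacao_de_espelhamento (espelhamento matriz matriz_selecionada y_selecao x_selecao orientacao_de_espelhamento)

-- ===== LEMMAS AND PROOFS =====
theorem fill_gen {α : Type} (step : List α → Int → List α) (f : Int → α → α) (d : α)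
    (hstep : ∀ (r : List α) (i : Int), 0 ≤ i → i < r.length →
      step r i = PySem.List.pySetD r i (f i (PySem.List.pyGetD r i d))) :
    ∀ (n : Nat) (xs : List α), n ≤ xs.length →
      List.foldl step xs (PySem.List.pyRange 0 (n : Int) 1)
        = (List.range n).map (fun i : Nat => f (i : Int) (xs.getD i d)) ++ xs.drop n := by
  intro n
  induction n with
  | zero => intro xs _; simp
  | succ n ih =>
    intro xs h
    have hn : n < xs.length := by omega
    have hcast : ((n + 1 : Nat) : Int) = (n : Int) + 1 := by push_cast; ring
    rw [hcast, PySem.List.pyRange_one_succ_right (by positivity), List.foldl_append]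
    rw [ih xs (by omega)]
    set P := (List.range n).map (fun i : Nat => f (i : Int) (xs.getD i d)) with hP
    have hPlen : P.length = n := by simp [hP]
    have hRlen : (P ++ xs.drop n).length = xs.length := by simp [hPlen]; omega
    simp only [List.foldl_cons, List.foldl_nil]
    rw [hstep _ _ (by positivity) (by rw [hRlen]; exact_mod_cast hn)]
    have hget : PySem.List.pyGetD (P ++ xs.drop n) (n : Int) d = xs.getD n d := by
      rw [PySem.List.pyGetD_natCast]
      unfold List.getD
      rw [List.getElem?_append_right (by omega), hPlen, Nat.sub_self, List.getElem?_drop]; simp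
    rw [hget, PySem.List.pySetD_natCast, List.set_append, if_neg (by omega), hPlen, Nat.sub_self]
    rw [List.drop_eq_getElem_cons hn, List.set_cons_zero]
    rw [List.range_succ, List.map_append]
    simp [hP, List.getD]

theorem inner_as_row (v : Int → String) :
    ∀ (js : List Int) (me : List (List String)) (i : Int), 0 ≤ i → i < me.length →
      js.foldl (fun m j => pySet2d m i j (v j)) me
        = PySem.List.pySetD me i
            (js.foldl (fun r j => PySem.List.pySetD r j (v j)) (PySem.List.pyGetD me i [])) := by
  intro js
  induction js with
  | nil =>
    intro me i h0 hlt
    obtain ⟨k, rfl⟩ : ∃ k : Nat, i = (k : Int) := ⟨i.toNat, by omega⟩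
    have hlt' : k < me.length := by omega
    simp only [List.foldl_nil, PySem.List.pySetD_natCast, PySem.List.pyGetD_natCast,
      List.getD_eq_getElem _ _ hlt', List.set_getElem_self]
  | cons j0 js ih =>
    intro me i h0 hlt
    obtain ⟨k, rfl⟩ : ∃ k : Nat, i = (k : Int) := ⟨i.toNat, by omega⟩
    have hlt' : k < me.length := by omega
    simp only [List.foldl_cons]
    rw [show pySet2d me (k : Int) j0 (v j0)
        = PySem.List.pySetD me (k : Int) (PySem.List.pySetD (PySem.List.pyGetD me (k : Int) []) j0 (v j0)) from rfl]
    rw [ih _ (k : Int) h0 (by rw [PySem.List.length_pySetD]; exact hlt)]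
    rw [PySem.List.pyGetD_pySetD_natCast _ _ _ _ _ hlt', if_pos rfl]
    rw [PySem.List.pySetD_natCast, PySem.List.pySetD_natCast, PySem.List.pySetD_natCast,
      List.set_set]

theorem criar_eq (a l : Nat) (t : String) :
    criar_matriz (a : Int) (l : Int) t = List.replicate a (List.replicate l t) := by
  unfold criar_matriz
  rw [show (fun (acc : List (List String)) (_ : Int) =>
        acc ++ [(PySem.List.pyRange 0 (l : Int) 1).foldl (fun row _ => row ++ [t]) []])
      = (fun acc x => acc ++ [(fun (_ : Int) => (PySem.List.pyRange 0 (l : Int) 1).foldl (fun row _ => row ++ [t]) []) x]) from rfl]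
  rw [PySem.List.foldl_append_singleton_eq_map]
  rw [show (fun (row : List String) (_ : Int) => row ++ [t])
      = (fun row x => row ++ [(fun (_ : Int) => t) x]) from rfl]
  rw [PySem.List.foldl_append_singleton_eq_map]
  simp [List.map_const', PySem.List.length_pyRange_one]

theorem me_v (ms : List (List String)) (L : Nat) :
    (PySem.List.pyRange 0 (ms.length : Int) 1).foldl
      (fun me i =>
        (PySem.List.pyRange 0 (L : Int) 1).foldl
          (fun me j => pySet2d me i j
            (PySem.List.pyGetD (PySem.List.pyGetD ms ((ms.length : Int) - 1 - i) []) j " ")) me)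
      (List.replicate ms.length (List.replicate L " "))
    = (List.range ms.length).map (fun i : Nat =>
        (List.range L).map (fun j : Nat =>
          PySem.List.pyGetD (PySem.List.pyGetD ms ((ms.length : Int) - 1 - (i : Int)) []) (j : Int) " ")) := by
  rw [fill_gen _
      (fun i row => (PySem.List.pyRange 0 (L : Int) 1).foldl
        (fun r j => PySem.List.pySetD r j
          (PySem.List.pyGetD (PySem.List.pyGetD ms ((ms.length : Int) - 1 - i) []) j " ")) row)
      []
      (fun r i h0 hlt => inner_as_row _ _ r i h0 hlt)
      ms.length _ (by simp)]
  simp only [List.drop_replicate, Nat.sub_self, List.replicate_zero, List.append_nil]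
  apply List.map_congr_left
  intro i hi
  rw [List.mem_range] at hi
  rw [List.getD_eq_getElem _ _ (by simpa using hi), List.getElem_replicate]
  rw [fill_gen _
      (fun j _ => PySem.List.pyGetD (PySem.List.pyGetD ms ((ms.length : Int) - 1 - (i : Int)) []) j " ")
      " " (fun r j h0 hlt => rfl) L _ (by simp)]
  simp


-- ===== VERDICT (by name: the statement is the Claim_ definition above) =====
theorem espelhamento_spec : Claim_equal_espelhamento := by
  intro m ms y x o _ hpre
  obtain ⟨-, hL | ⟨hor, -, -⟩⟩ := hpre
  · -- largura = 0: every inner loop is empty and both sides return matriz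
    unfold Spec_espelhamento espelhamento espelhamento_alt
    simp [hL]
  · unfold Spec_espelhamento espelhamento espelhamento_alt
    rw [PySem.List.enumerate_eq_map_pyRange ms [], List.foldl_map]
    simp only [PySem.List.len]
    apply PySem.List.foldl_congr_mem
    intro acc i hi
    rw [PySem.List.mem_pyRange_one] at hi
    apply PySem.List.foldl_congr_mem
    intro acc2 j hj
    rw [PySem.List.mem_pyRange_one] at hj
    congr 1
    rcases hor with h | h <;> subst h
    · simp only [beq_self_eq_true, if_true]
      rw [show (fun (acc : List (List String)) (linha : List String) =>
          acc ++ [(PySem.List.slice? linha none none (-1)).getD []])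
        = (fun acc linha => acc ++ [(fun l : List String => (PySem.List.slice? l none none (-1)).getD []) linha]) from rfl]
      rw [PySem.List.foldl_append_singleton_eq_map]
      have hmap := PySem.List.pyGetD_map (List.reverse (α := String)) ms i ([] : List String)
      simp only [List.reverse_nil] at hmap
      simp only [List.nil_append, PySem.List.slice?_none_none_neg_one, Option.getD_some, hmap]
    · simp only [show (("v" : String) == "h") = false from rfl, Bool.false_eq_true, if_false,
        beq_self_eq_true, if_true]
      rw [criar_eq, me_v]
      obtain ⟨ki, rfl⟩ : ∃ k : Nat, i = (k : Int) := ⟨i.toNat, by omega⟩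
      obtain ⟨kj, rfl⟩ : ∃ k : Nat, j = (k : Int) := ⟨j.toNat, by omega⟩
      have hki : ki < ms.length := by exact_mod_cast hi.2
      have hkj : kj < (PySem.List.pyGetD ms 0 []).length := by exact_mod_cast hj.2
      simp only [PySem.List.pyGetD_natCast]
      rw [PySem.List.getD_map_range _ _ _ _ hki, PySem.List.getD_map_range _ _ _ _ hkj]
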